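-- pv_equiv track=rewrite | github.com/lew1464313834-ctrl/DES | src/generate_cso_attacker/closed_loop_system_generator.py | generate_states_closed_loop_system
-- ===== SOURCE A (Python) =====
-- from collections import deque
--
-- def generate_states_closed_loop_system(
--     state_initial_origin_ststem,
--     state_initial_supervisor,
--     event_system,
--     transition_origin_system,
--     transition_supervisor,
--     max_depth=15 # 增加默认深度以覆盖更完整的状态空间
--     ):
--     """
--     通过可达性搜索生成闭环系统的所有状态集合。
--     :return: 闭环系统状态集合，元素格式为 (supervisor_state, origin_system_state)
--     """
--     states_closed_loop_system = list()
--
--     # 1. 确定初始状态对并加入队列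
--     # 初始状态对集合由监督器初始状态和系统初始状态的笛卡尔积构成
--     queue = deque()
--     for s_init in state_initial_supervisor:
--         for o_init in state_initial_origin_ststem:
--             initial_pair = (s_init, o_init)
--             if initial_pair not in states_closed_loop_system:
--                 states_closed_loop_system.append(initial_pair)
--                 queue.append((initial_pair, 0)) # 存储 (状态对, 当前深度)
--
--     # 2. 广度优先搜索 (BFS) 遍历可达状态
--     while queue:
--         (curr_s, curr_o), depth = queue.popleft()
--
--         # 超过最大深度限制则停止扩展该分支
--         if depth >= max_depth:
--             continue
--
--         # 遍历系统中可能发生的所有事件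
--         for event in event_system:
--             o_key = (curr_o, event)
--             s_key = (curr_s, event)
--
--             # 只有当原系统和监督器在当前状态下都定义了该事件时，转移才有效
--             if o_key in transition_origin_system and s_key in transition_supervisor:
--                 next_o = transition_origin_system[o_key]
--                 next_s = transition_supervisor[s_key]
--                 next_pair = (next_s, next_o)
--
--                 # 如果是新发现的状态，记录并加入搜索队列
--                 if next_pair not in states_closed_loop_system:
--                     states_closed_loop_system.append(next_pair)
--                     queue.append((next_pair, depth + 1))
--             states_closed_loop_system.sort()
--     return states_closed_loop_system
-- ===== SOURCE B (Python) =====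
-- def generate_states_closed_loop_system(
--     state_initial_origin_ststem,
--     state_initial_supervisor,
--     event_system,
--     transition_origin_system,
--     transition_supervisor,
--     max_depth=15
--     ):
--     # Relational saturation: join the two transition dicts on their shared event
--     # once into an explicit product transition relation, then repeatedly take the
--     # one-step image of the whole reachable set until a fixpoint (at most
--     # max_depth rounds), and sort the result.
--     events = set(event_system)
--     orig_by_event = {}
--     for (o, e), o2 in transition_origin_system.items():
--         if e in events:
--             orig_by_event.setdefault(e, []).append((o, o2))
--     edges = []
--     for (s, e), s2 in transition_supervisor.items():
--         for (o, o2) in orig_by_event.get(e, ()):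
--             edges.append(((s, o), (s2, o2)))
--     reach = {(s, o) for s in state_initial_supervisor for o in state_initial_origin_ststem}
--     for _ in range(max_depth):
--         new = {q for (p, q) in edges if p in reach} - reach
--         if not new:
--             break
--         reach |= new
--     return sorted(reach)
-- ===== Notes on version B (the rewrite author's own statement) =====
-- stated objective: faster
-- what changed: Replaces A's depth-tagged FIFO BFS (linear-list membership tests and a full re-sort of the visited list after every event of every popped node) by a relational saturation: the two transition dicts are hash-joined once on their shared event into an explicit product edge relation, then the one-step image of the whole reachable set is taken repeatedly until a fixpoint (at most max_depth rounds), sorting once at the end.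
-- intended difference: On inputs where no expansion round can run (max_depth <= 0 or event_system empty) and the distinct initial pairs are not already in ascending order, A returns them in construction order because its sort statement sits inside the per-event loop and never executes, while B returns them sorted; sorted is the intended value since every other path of A returns a sorted list. — e.g. on generate_states_closed_loop_system([1, 0], [0], [], [], [], 15): A returns [(0, 1), (0, 0)], B returns [(0, 0), (0, 1)]
import Mathlib
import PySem

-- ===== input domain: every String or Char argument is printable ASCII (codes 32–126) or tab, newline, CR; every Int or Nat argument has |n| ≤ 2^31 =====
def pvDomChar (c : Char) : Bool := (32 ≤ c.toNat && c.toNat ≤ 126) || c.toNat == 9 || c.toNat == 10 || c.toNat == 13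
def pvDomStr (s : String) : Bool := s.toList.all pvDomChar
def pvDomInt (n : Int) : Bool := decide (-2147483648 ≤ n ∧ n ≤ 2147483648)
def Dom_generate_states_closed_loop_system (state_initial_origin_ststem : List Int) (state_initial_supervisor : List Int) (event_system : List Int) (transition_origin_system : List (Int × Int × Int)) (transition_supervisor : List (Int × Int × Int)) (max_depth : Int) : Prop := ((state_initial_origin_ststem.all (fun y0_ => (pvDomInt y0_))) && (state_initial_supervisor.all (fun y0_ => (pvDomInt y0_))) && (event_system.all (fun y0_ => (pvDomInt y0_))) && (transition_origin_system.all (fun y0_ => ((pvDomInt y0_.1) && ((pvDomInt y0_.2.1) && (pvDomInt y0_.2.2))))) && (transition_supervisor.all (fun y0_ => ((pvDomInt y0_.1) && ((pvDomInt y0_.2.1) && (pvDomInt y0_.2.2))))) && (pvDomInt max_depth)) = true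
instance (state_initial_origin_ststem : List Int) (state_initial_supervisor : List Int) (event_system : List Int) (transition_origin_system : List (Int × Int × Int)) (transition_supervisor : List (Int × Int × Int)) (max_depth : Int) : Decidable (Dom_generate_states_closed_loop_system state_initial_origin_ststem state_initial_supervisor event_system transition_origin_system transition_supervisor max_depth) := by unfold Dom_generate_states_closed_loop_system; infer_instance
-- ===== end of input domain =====

-- B replaces A's depth-tagged queue BFS (linear-list visited tests, the visited list
-- re-sorted after every event) by a relational saturation: the two transition dicts are
-- joined once on their shared event into an explicit product edge relation, then the
-- one-step image of the whole reachable set is iterated to a fixpoint (at most max_depth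
-- rounds), sorting once at the end; objective: faster.

-- ===== PORT A =====
-- A's BFS pop loop.  The Nat argument is pure fuel making the recursion structural; the
-- proofs show it is never exhausted (each pop consumes one unit and the number of queue
-- entries ever created is at most the initial fuel).
def pvLoopA (es : List Int) (tro trs : List (Int × Int × Int)) (md : Int) :
    Nat → List (Int × Int) → List ((Int × Int) × Int) → List (Int × Int)
  | _, vis, [] => vis
  | 0, vis, _ :: _ => vis
  | fuel+1, vis, (curr, depth) :: qs =>
    if md ≤ depth then pvLoopA es tro trs md fuel vis qs
    else
      let st := es.foldl
        (fun (st : List (Int × Int) × List ((Int × Int) × Int)) e =>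
          let st' :=
            match tro.find? (fun t => t.1 == curr.2 && t.2.1 == e),
                  trs.find? (fun t => t.1 == curr.1 && t.2.1 == e) with
            | some to_, some ts_ =>
                if (ts_.2.2, to_.2.2) ∈ st.1 then st
                else (st.1 ++ [(ts_.2.2, to_.2.2)], st.2 ++ [((ts_.2.2, to_.2.2), depth + 1)])
            | _, _ => st
          (PySem.List.sorted2 st'.1 (fun p => p.1) (fun p => p.2), st'.2))
        (vis, qs)
      pvLoopA es tro trs md fuel st.1 st.2

def generate_states_closed_loop_system (state_initial_origin_ststem : List Int) (state_initial_supervisor : List Int) (event_system : List Int) (transition_origin_system : List (Int × Int × Int)) (transition_supervisor : List (Int × Int × Int)) (max_depth : Int) : List (Int × Int) :=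
  let init := state_initial_supervisor.foldl
    (fun (st : List (Int × Int) × List ((Int × Int) × Int)) s_init =>
      state_initial_origin_ststem.foldl
        (fun st o_init =>
          if (s_init, o_init) ∈ st.1 then st
          else (st.1 ++ [(s_init, o_init)], st.2 ++ [((s_init, o_init), (0 : Int))])) st)
    ([], [])
  pvLoopA event_system transition_origin_system transition_supervisor max_depth
    (state_initial_supervisor.length * state_initial_origin_ststem.length +
      transition_supervisor.length * transition_origin_system.length + 1)
    init.1 init.2

-- ===== PORT B =====
-- `.items()` of a dict handed over as an association list: the first binding of each key
def pvSameKey (t u : Int × Int × Int) : Bool := u.1 == t.1 && u.2.1 == t.2.1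

def pvItemsAux : Nat → List (Int × Int × Int) → List (Int × Int × Int)
  | _, [] => []
  | 0, _ :: _ => []
  | n+1, t :: r => t :: pvItemsAux n (r.filter (fun u => !pvSameKey t u))

def pvItems (l : List (Int × Int × Int)) : List (Int × Int × Int) :=
  pvItemsAux l.length l

-- `orig_by_event.setdefault(e, []).append((o, o2))` over the origin dict's items
def pvByEvent (events : PySem.Set Int) (tro : List (Int × Int × Int)) :
    PySem.Dict Int (List (Int × Int)) :=
  (pvItems tro).foldl
    (fun d t =>
      if t.2.1 ∈ events then d.modify t.2.1 [] (fun l => l ++ [(t.1, t.2.2)]) else d)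
    PySem.Dict.empty

-- the product transition relation, joined once on the shared event
def pvEdges (events : PySem.Set Int) (tro trs : List (Int × Int × Int)) :
    List ((Int × Int) × (Int × Int)) :=
  let byev := pvByEvent events tro
  (pvItems trs).foldl
    (fun acc t =>
      acc ++ (byev.getD t.2.1 []).map (fun q => ((t.1, q.1), (t.2.2, q.2))))
    []

-- `for _ in range(max_depth): new = image - reach; if not new: break; reach |= new`
def pvSat (edges : List ((Int × Int) × (Int × Int))) :
    Nat → PySem.Set (Int × Int) → PySem.Set (Int × Int)
  | 0, reach => reach
  | n+1, reach =>
    let nw := PySem.Set.diff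
      (PySem.Set.ofList ((edges.filter (fun pq => decide (pq.1 ∈ reach))).map (fun pq => pq.2)))
      reach
    if nw = [] then reach
    else pvSat edges n (PySem.Set.union reach nw)

def generate_states_closed_loop_system_alt (state_initial_origin_ststem : List Int) (state_initial_supervisor : List Int) (event_system : List Int) (transition_origin_system : List (Int × Int × Int)) (transition_supervisor : List (Int × Int × Int)) (max_depth : Int) : List (Int × Int) :=
  let events := PySem.Set.ofList event_system
  let edges := pvEdges events transition_origin_system transition_supervisor
  let reach := PySem.Set.ofList
    (state_initial_supervisor.flatMap (fun s => state_initial_origin_ststem.map (fun o => (s, o))))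
  PySem.List.sorted2 (pvSat edges max_depth.toNat reach) (fun p => p.1) (fun p => p.2)

-- ===== PRECONDITION & SPEC =====
-- On inputs where no expansion round can run (max_depth ≤ 0 or event_system empty) and the
-- initial pairs are not already in ascending order (both initial-state lists nonempty and
-- not both duplicate-free ascending), A returns the distinct initial pairs in construction
-- order (its sort statement sits inside the per-event loop and never executes) while B
-- returns them sorted; sorted is the intended value since every other path of A is sorted.
def D_generate_states_closed_loop_system (state_initial_origin_ststem : List Int) (state_initial_supervisor : List Int) (event_system : List Int) (transition_origin_system : List (Int × Int × Int)) (transition_supervisor : List (Int × Int × Int)) (max_depth : Int) : Prop :=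
  (max_depth ≤ 0 ∨ event_system = []) ∧
    ¬ (state_initial_supervisor = [] ∨ state_initial_origin_ststem = [] ∨
        (List.Pairwise (· < ·) (PySem.List.dedup state_initial_supervisor) ∧
         List.Pairwise (· < ·) (PySem.List.dedup state_initial_origin_ststem)))
instance (state_initial_origin_ststem : List Int) (state_initial_supervisor : List Int) (event_system : List Int) (transition_origin_system : List (Int × Int × Int)) (transition_supervisor : List (Int × Int × Int)) (max_depth : Int) : Decidable (D_generate_states_closed_loop_system state_initial_origin_ststem state_initial_supervisor event_system transition_origin_system transition_supervisor max_depth) := by unfold D_generate_states_closed_loop_system; infer_instance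

def Spec_generate_states_closed_loop_system (state_initial_origin_ststem : List Int) (state_initial_supervisor : List Int) (event_system : List Int) (transition_origin_system : List (Int × Int × Int)) (transition_supervisor : List (Int × Int × Int)) (max_depth : Int) (out : List (Int × Int)) : Prop := ¬ D_generate_states_closed_loop_system state_initial_origin_ststem state_initial_supervisor event_system transition_origin_system transition_supervisor max_depth → out = generate_states_closed_loop_system_alt state_initial_origin_ststem state_initial_supervisor event_system transition_origin_system transition_supervisor max_depth
instance (state_initial_origin_ststem : List Int) (state_initial_supervisor : List Int) (event_system : List Int) (transition_origin_system : List (Int × Int × Int)) (transition_supervisor : List (Int × Int × Int)) (max_depth : Int) (out : List (Int × Int)) : Decidable (Spec_generate_states_closed_loop_system state_initial_origin_ststem state_initial_supervisor event_system transition_origin_system transition_supervisor max_depth out) := by unfold Spec_generate_states_closed_loop_system; infer_instance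

def pvDiffWitness_generate_states_closed_loop_system : List Int × List Int × List Int × (List (Int × Int × Int)) × (List (Int × Int × Int)) × Int :=
  ([1, 0], [0], [], [], [], 15)
def pvDiffWitnessOut_generate_states_closed_loop_system : (List (Int × Int)) × (List (Int × Int)) :=
  ([(0, 1), (0, 0)], [(0, 0), (0, 1)])

-- ===== CLAIM (what is proved, stated in full; the proofs are below) =====
def Claim_unchanged_generate_states_closed_loop_system : Prop := ∀ (state_initial_origin_ststem : List Int) (state_initial_supervisor : List Int) (event_system : List Int) (transition_origin_system : List (Int × Int × Int)) (transition_supervisor : List (Int × Int × Int)) (max_depth : Int), Dom_generate_states_closed_loop_system state_initial_origin_ststem state_initial_supervisor event_system transition_origin_system transition_supervisor max_depth → Spec_generate_states_closed_loop_system state_initial_origin_ststem state_initial_supervisor event_system transition_origin_system transition_supervisor max_depth (generate_states_closed_loop_system state_initial_origin_ststem state_initial_supervisor event_system transition_origin_system transition_supervisor max_depth)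
def Claim_changed_generate_states_closed_loop_system : Prop := Dom_generate_states_closed_loop_system (pvDiffWitness_generate_states_closed_loop_system.1) (pvDiffWitness_generate_states_closed_loop_system.2.1) (pvDiffWitness_generate_states_closed_loop_system.2.2.1) (pvDiffWitness_generate_states_closed_loop_system.2.2.2.1) (pvDiffWitness_generate_states_closed_loop_system.2.2.2.2.1) (pvDiffWitness_generate_states_closed_loop_system.2.2.2.2.2) ∧ D_generate_states_closed_loop_system (pvDiffWitness_generate_states_closed_loop_system.1) (pvDiffWitness_generate_states_closed_loop_system.2.1) (pvDiffWitness_generate_states_closed_loop_system.2.2.1) (pvDiffWitness_generate_states_closed_loop_system.2.2.2.1) (pvDiffWitness_generate_states_closed_loop_system.2.2.2.2.1) (pvDiffWitness_generate_states_closed_loop_system.2.2.2.2.2) ∧ generate_states_closed_loop_system (pvDiffWitness_generate_states_closed_loop_system.1) (pvDiffWitness_generate_states_closed_loop_system.2.1) (pvDiffWitness_generate_states_closed_loop_system.2.2.1) (pvDiffWitness_generate_states_closed_loop_system.2.2.2.1) (pvDiffWitness_generate_states_closed_loop_system.2.2.2.2.1) (pvDiffWitness_generate_states_closed_loop_system.2.2.2.2.2)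 = pvDiffWitnessOut_generate_states_closed_loop_system.1 ∧ generate_states_closed_loop_system_alt (pvDiffWitness_generate_states_closed_loop_system.1) (pvDiffWitness_generate_states_closed_loop_system.2.1) (pvDiffWitness_generate_states_closed_loop_system.2.2.1) (pvDiffWitness_generate_states_closed_loop_system.2.2.2.1) (pvDiffWitness_generate_states_closed_loop_system.2.2.2.2.1) (pvDiffWitness_generate_states_closed_loop_system.2.2.2.2.2) = pvDiffWitnessOut_generate_states_closed_loop_system.2 ∧ pvDiffWitnessOut_generate_states_closed_loop_system.1 ≠ pvDiffWitnessOut_generate_states_closed_loop_system.2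
def Claim_exact_generate_states_closed_loop_system : Prop := ∀ (state_initial_origin_ststem : List Int) (state_initial_supervisor : List Int) (event_system : List Int) (transition_origin_system : List (Int × Int × Int)) (transition_supervisor : List (Int × Int × Int)) (max_depth : Int), Dom_generate_states_closed_loop_system state_initial_origin_ststem state_initial_supervisor event_system transition_origin_system transition_supervisor max_depth → D_generate_states_closed_loop_system state_initial_origin_ststem state_initial_supervisor event_system transition_origin_system transition_supervisor max_depth → generate_states_closed_loop_system state_initial_origin_ststem state_initial_supervisor event_system transition_origin_system transition_supervisor max_depth ≠ generate_states_closed_loop_system_alt state_initial_origin_ststem state_initial_supervisor event_system transition_origin_system transition_supervisor max_depth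

-- ===== LEMMAS AND PROOFS =====

-- ---- A's per-event fold body, named for the proofs (definitionally the lambda in pvLoopA) ----
def pvAev (tro trs : List (Int × Int × Int)) (curr : Int × Int) (depth : Int)
    (st : List (Int × Int) × List ((Int × Int) × Int)) (e : Int) :
    List (Int × Int) × List ((Int × Int) × Int) :=
  let st' :=
    match tro.find? (fun t => t.1 == curr.2 && t.2.1 == e),
          trs.find? (fun t => t.1 == curr.1 && t.2.1 == e) with
    | some to_, some ts_ =>
        if (ts_.2.2, to_.2.2) ∈ st.1 then st
        else (st.1 ++ [(ts_.2.2, to_.2.2)], st.2 ++ [((ts_.2.2, to_.2.2), depth + 1)])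
    | _, _ => st
  (PySem.List.sorted2 st'.1 (fun p => p.1) (fun p => p.2), st'.2)

theorem pvLoopA_nil (es : List Int) (tro trs : List (Int × Int × Int)) (md : Int)
    (fuel : Nat) (vis : List (Int × Int)) :
    pvLoopA es tro trs md fuel vis [] = vis := by cases fuel <;> rfl

theorem pvLoopA_cons (es : List Int) (tro trs : List (Int × Int × Int)) (md : Int)
    (fuel : Nat) (vis : List (Int × Int)) (curr : Int × Int) (depth : Int)
    (qs : List ((Int × Int) × Int)) :
    pvLoopA es tro trs md (fuel+1) vis ((curr, depth) :: qs) =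
      if md ≤ depth then pvLoopA es tro trs md fuel vis qs
      else
        let st := es.foldl (pvAev tro trs curr depth) (vis, qs)
        pvLoopA es tro trs md fuel st.1 st.2 := rfl

-- Python's sort of int pairs is sorting by the (injective) lexicographic key
theorem pvSort2_eq (xs : List (Int × Int)) :
    PySem.List.sorted2 xs (fun p => p.1) (fun p => p.2) =
      PySem.List.sorted xs (fun p => toLex (p.1, p.2)) := by
  rw [PySem.List.sorted_eq_foldl_insertBy]
  unfold PySem.List.sorted2
  show List.foldl (fun acc x => PySem.List.insertBy (fun a b : Int × Int =>
      decide (a.1 < b.1) || (!decide (b.1 < a.1) && decide (a.2 < b.2))) x acc) [] xs = _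
  congr 1
  funext acc x
  congr 1
  funext a b
  show (decide (a.1 < b.1) || (!decide (b.1 < a.1) && decide (a.2 < b.2)))
      = decide (toLex (a.1, a.2) < toLex (b.1, b.2))
  by_cases h1 : a.1 < b.1 <;> by_cases h2 : b.1 < a.1 <;> by_cases h3 : a.2 < b.2 <;>
    simp [h1, h2, h3, Prod.Lex.lt_iff] <;> omega

theorem pvKey_inj : Function.Injective (fun p : Int × Int => toLex (p.1, p.2)) := by
  intro p q h
  have := toLex.injective h
  exact Prod.ext_iff.2 ⟨congrArg Prod.fst this, congrArg Prod.snd this⟩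

theorem pvSort2_congr {xs ys : List (Int × Int)} (h : xs.Perm ys) :
    PySem.List.sorted2 xs (fun p => p.1) (fun p => p.2) =
      PySem.List.sorted2 ys (fun p => p.1) (fun p => p.2) := by
  rw [pvSort2_eq, pvSort2_eq]
  exact PySem.List.sorted_eq_sorted_of_perm _ _ _ pvKey_inj h

theorem pvSort2_perm (xs : List (Int × Int)) :
    (PySem.List.sorted2 xs (fun p => p.1) (fun p => p.2)).Perm xs :=
  PySem.List.sorted2_perm xs _ _ _

theorem pvSort2_idem (xs : List (Int × Int)) :
    PySem.List.sorted2 (PySem.List.sorted2 xs (fun p => p.1) (fun p => p.2))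
      (fun p => p.1) (fun p => p.2) =
      PySem.List.sorted2 xs (fun p => p.1) (fun p => p.2) :=
  pvSort2_congr (pvSort2_perm xs)

theorem pvLoopA_drain (es : List Int) (tro trs : List (Int × Int × Int)) (md : Int) :
    ∀ (q : List ((Int × Int) × Int)) (fuel : Nat) (vis : List (Int × Int)),
      (∀ x ∈ q, md ≤ x.2 ∨ es = []) → q.length ≤ fuel →
      pvLoopA es tro trs md fuel vis q = vis := by
  intro q
  induction q with
  | nil => intro fuel vis _ _; cases fuel <;> rfl
  | cons x qs ih =>
    rintro fuel vis hq hlen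
    obtain ⟨p, depth⟩ := x
    cases fuel with
    | zero => simp at hlen
    | succ f =>
      have hlen' : qs.length ≤ f := by simpa using hlen
      have hq' : ∀ x ∈ qs, md ≤ x.2 ∨ es = [] := fun x hx => hq x (List.mem_cons_of_mem _ hx)
      rw [pvLoopA_cons]
      rcases hq (p, depth) (List.mem_cons_self) with h | h
      · rw [if_pos h]; exact ih f vis hq' hlen'
      · subst h
        split_ifs with hd
        · exact ih f vis hq' hlen'
        · simpa using ih f vis hq' hlen'

-- ---- the frontier-rounds intermediate form of A's BFS, used only by the proofs ----
def pvGet (ts : List (Int × Int × Int)) (s e : Int) : Option Int :=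
  (ts.find? (fun t => t.1 == s && t.2.1 == e)).map (fun t => t.2.2)

def pvBev (tro trs : List (Int × Int × Int)) (p : Int × Int)
    (st : PySem.Set (Int × Int) × List (Int × Int)) (e : Int) :
    PySem.Set (Int × Int) × List (Int × Int) :=
  match pvGet tro p.2 e, pvGet trs p.1 e with
  | some next_o, some next_s =>
      if (next_s, next_o) ∈ st.1 then st
      else (PySem.Set.add st.1 (next_s, next_o), st.2 ++ [(next_s, next_o)])
  | _, _ => st

def pvStep (es : List Int) (tro trs : List (Int × Int × Int))
    (st : PySem.Set (Int × Int) × List (Int × Int)) (p : Int × Int) :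
    PySem.Set (Int × Int) × List (Int × Int) :=
  es.foldl (pvBev tro trs p) st

def pvRounds (es : List Int) (tro trs : List (Int × Int × Int)) :
    Nat → PySem.Set (Int × Int) → List (Int × Int) → PySem.Set (Int × Int)
  | 0, vis, _ => vis
  | n+1, vis, front =>
    if front = [] then vis
    else
      let st := front.foldl (pvStep es tro trs) (vis, [])
      pvRounds es tro trs n st.1 st.2

theorem pvRounds_nil (es : List Int) (tro trs : List (Int × Int × Int))
    (k : Nat) (vis : PySem.Set (Int × Int)) :
    pvRounds es tro trs k vis [] = vis := by cases k <;> simp [pvRounds]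

-- ---- seed phase: A's paired fold is the seed list plus depth-0 tags ----

theorem pvFoldPre {a : Type} (stB : List (Int × Int) → a → List (Int × Int))
    (hpre : ∀ L x, ∃ ext, stB L x = L ++ ext) :
    ∀ (l : List a) (L : List (Int × Int)), ∃ ext, l.foldl stB L = L ++ ext := by
  intro l
  induction l with
  | nil => intro L; exact ⟨[], by simp⟩
  | cons x l ih =>
    intro L
    obtain ⟨e1, he1⟩ := hpre L x
    obtain ⟨e2, he2⟩ := ih (stB L x)
    exact ⟨e1 ++ e2, by rw [List.foldl_cons, he2, he1, List.append_assoc]⟩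

theorem pvPairFoldSim {a : Type} (stB : List (Int × Int) → a → List (Int × Int))
    (stA : List (Int × Int) × List ((Int × Int) × Int) → a → List (Int × Int) × List ((Int × Int) × Int))
    (hstep : ∀ L q x, stA (L, q) x =
      (stB L x, q ++ ((stB L x).drop L.length).map (fun p => (p, (0 : Int)))))
    (hpre : ∀ L x, ∃ ext, stB L x = L ++ ext) :
    ∀ (l : List a) (L : List (Int × Int)) (q : List ((Int × Int) × Int)),
      l.foldl stA (L, q) =
        (l.foldl stB L, q ++ ((l.foldl stB L).drop L.length).map (fun p => (p, (0 : Int)))) := by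
  intro l
  induction l with
  | nil => intro L q; simp
  | cons x l ih =>
    intro L q
    rw [List.foldl_cons, List.foldl_cons, hstep, ih]
    obtain ⟨e1, he1⟩ := hpre L x
    obtain ⟨e2, he2⟩ := pvFoldPre stB hpre l (stB L x)
    rw [he2, he1]
    rw [show L ++ e1 ++ e2 = L ++ (e1 ++ e2) from (List.append_assoc _ _ _)]
    rw [List.drop_left, List.drop_left]
    simp [List.append_assoc]

def pvSeedIn (sio : List Int) (s : Int) (acc : List (Int × Int)) : List (Int × Int) :=
  sio.foldl (fun acc o_init => if (s, o_init) ∈ acc then acc else acc ++ [(s, o_init)]) acc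

def pvSeeds (sio sis : List Int) : List (Int × Int) :=
  sis.foldl (fun acc s_init => pvSeedIn sio s_init acc) []

theorem pvSeedIn_hstep (sio : List Int) (s : Int) :
    ∀ (L : List (Int × Int)) (q : List ((Int × Int) × Int)),
      sio.foldl
        (fun (st : List (Int × Int) × List ((Int × Int) × Int)) o_init =>
          if (s, o_init) ∈ st.1 then st
          else (st.1 ++ [(s, o_init)], st.2 ++ [((s, o_init), (0 : Int))])) (L, q) =
      (pvSeedIn sio s L, q ++ ((pvSeedIn sio s L).drop L.length).map (fun p => (p, (0 : Int)))) := by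
  intro L q
  refine pvPairFoldSim _ _ ?_ ?_ sio L q
  · intro L q o
    by_cases hm : (s, o) ∈ L
    · simp [hm, List.drop_length]
    · simp [hm]
  · intro L o
    by_cases hm : (s, o) ∈ L
    · exact ⟨[], by simp [hm]⟩
    · exact ⟨[(s, o)], by simp [hm]⟩

theorem pvSeedIn_pre (sio : List Int) (s : Int) (L : List (Int × Int)) :
    ∃ ext, pvSeedIn sio s L = L ++ ext := by
  refine pvFoldPre _ ?_ sio L
  intro L o
  by_cases hm : (s, o) ∈ L
  · exact ⟨[], by simp [hm]⟩
  · exact ⟨[(s, o)], by simp [hm]⟩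

theorem pvInit_eq (sio sis : List Int) :
    sis.foldl
      (fun (st : List (Int × Int) × List ((Int × Int) × Int)) s_init =>
        sio.foldl
          (fun st o_init =>
            if (s_init, o_init) ∈ st.1 then st
            else (st.1 ++ [(s_init, o_init)], st.2 ++ [((s_init, o_init), (0 : Int))])) st)
      ([], []) =
    (pvSeeds sio sis, (pvSeeds sio sis).map (fun p => (p, (0 : Int)))) := by
  have h := pvPairFoldSim (fun acc s_init => pvSeedIn sio s_init acc)
    (fun st s_init =>
      sio.foldl
        (fun st o_init =>
          if (s_init, o_init) ∈ st.1 then st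
          else (st.1 ++ [(s_init, o_init)], st.2 ++ [((s_init, o_init), (0 : Int))])) st)
    (fun L q s => pvSeedIn_hstep sio s L q)
    (fun L s => pvSeedIn_pre sio s L) sis [] []
  rw [h]
  simp [pvSeeds]

theorem pvSeedIn_nodup (sio : List Int) (s : Int) :
    ∀ (acc : List (Int × Int)), acc.Nodup → (pvSeedIn sio s acc).Nodup := by
  induction sio with
  | nil => intro acc h; exact h
  | cons o sio ih =>
    intro acc h
    unfold pvSeedIn
    rw [List.foldl_cons]
    by_cases hm : (s, o) ∈ acc
    · simpa [pvSeedIn, hm] using ih acc h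
    · have hnd : (acc ++ [(s, o)]).Nodup := by
        simp [List.nodup_append, h]
        intro a b hab ha hb
        subst ha; subst hb; exact hm hab
      simpa [pvSeedIn, hm] using ih (acc ++ [(s, o)]) hnd

theorem pvSeeds_nodup (sio sis : List Int) : (pvSeeds sio sis).Nodup := by
  suffices h : ∀ (l : List Int) (acc : List (Int × Int)), acc.Nodup →
      (l.foldl (fun acc s_init => pvSeedIn sio s_init acc) acc).Nodup by
    exact h sis [] List.nodup_nil
  intro l
  induction l with
  | nil => intro acc h; exact h
  | cons s l ih => intro acc h; exact ih _ (pvSeedIn_nodup sio s acc h)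

theorem pvSeedIn_len (sio : List Int) (s : Int) :
    ∀ (acc : List (Int × Int)), (pvSeedIn sio s acc).length ≤ acc.length + sio.length := by
  induction sio with
  | nil => intro acc; simp [pvSeedIn]
  | cons o sio ih =>
    intro acc
    unfold pvSeedIn
    rw [List.foldl_cons]
    by_cases hm : (s, o) ∈ acc
    · have := ih acc; simp only [pvSeedIn] at this; simp [hm]; omega
    · have := ih (acc ++ [(s, o)]); simp only [pvSeedIn] at this
      simp [hm] at this ⊢; omega

theorem pvSeeds_len (sio sis : List Int) :
    (pvSeeds sio sis).length ≤ sis.length * sio.length := by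
  suffices h : ∀ (l : List Int) (acc : List (Int × Int)),
      (l.foldl (fun acc s_init => pvSeedIn sio s_init acc) acc).length ≤
        acc.length + l.length * sio.length by
    simpa using h sis []
  intro l
  induction l with
  | nil => intro acc; simp
  | cons s l ih =>
    intro acc
    rw [List.foldl_cons]
    have h1 := pvSeedIn_len sio s acc
    have h2 := ih (pvSeedIn sio s acc)
    simp only [List.length_cons]
    calc _ ≤ (pvSeedIn sio s acc).length + l.length * sio.length := h2
      _ ≤ _ := by rw [Nat.succ_mul]; omega

theorem pvSet_add_fresh {V : List (Int × Int)} {x : Int × Int} (h : x ∉ V) :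
    PySem.Set.add V x = V ++ [x] := by
  simp [PySem.Set.add, h]

theorem pvGet_mem {ts : List (Int × Int × Int)} {s e v : Int}
    (h : pvGet ts s e = some v) : v ∈ ts.map (fun t => t.2.2) := by
  unfold pvGet at h
  cases hf : ts.find? (fun t => t.1 == s && t.2.1 == e) with
  | none => rw [hf] at h; simp at h
  | some t =>
    rw [hf] at h
    simp at h
    exact h ▸ List.mem_map_of_mem (List.mem_of_find?_eq_some hf)

theorem pvBev_fold_props (tro trs : List (Int × Int × Int)) (p : Int × Int) :
    ∀ (es : List Int) (V G : List (Int × Int)), V.Nodup →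
      ((es.foldl (pvBev tro trs p) (V, G)).1).Nodup ∧
      (∀ x ∈ (es.foldl (pvBev tro trs p) (V, G)).1,
        x ∈ V ∨ (x.1 ∈ trs.map (fun t => t.2.2) ∧ x.2 ∈ tro.map (fun t => t.2.2))) ∧
      ((es.foldl (pvBev tro trs p) (V, G)).1).length + G.length =
        V.length + ((es.foldl (pvBev tro trs p) (V, G)).2).length := by
  intro es
  induction es with
  | nil => intro V G h; exact ⟨h, fun x hx => Or.inl hx, by simp⟩
  | cons e es ih =>
    intro V G h
    rw [List.foldl_cons]
    cases h1 : pvGet tro p.2 e with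
    | none =>
      cases h2 : pvGet trs p.1 e with
      | none =>
        have hstep : pvBev tro trs p (V, G) e = (V, G) := by simp only [pvBev, h1, h2]
        rw [hstep]; exact ih V G h
      | some next_s =>
        have hstep : pvBev tro trs p (V, G) e = (V, G) := by simp only [pvBev, h1, h2]
        rw [hstep]; exact ih V G h
    | some next_o =>
      cases h2 : pvGet trs p.1 e with
      | none =>
        have hstep : pvBev tro trs p (V, G) e = (V, G) := by simp only [pvBev, h1, h2]
        rw [hstep]; exact ih V G h
      | some next_s =>
        by_cases hm : (next_s, next_o) ∈ V
        · have hstep : pvBev tro trs p (V, G) e = (V, G) := by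
            simp only [pvBev, h1, h2, hm, if_true]
          rw [hstep]; exact ih V G h
        · have hstep : pvBev tro trs p (V, G) e =
              (V ++ [(next_s, next_o)], G ++ [(next_s, next_o)]) := by
            simp only [pvBev, h1, h2, hm, if_false]
            rw [pvSet_add_fresh hm]
          rw [hstep]
          have hnd : (V ++ [(next_s, next_o)]).Nodup := by
            simp [List.nodup_append, h]
            intro a b hab ha hb
            subst ha; subst hb; exact hm hab
          obtain ⟨ha, hb, hc⟩ := ih (V ++ [(next_s, next_o)]) (G ++ [(next_s, next_o)]) hnd
          refine ⟨ha, ?_, ?_⟩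
          · intro x hx
            rcases hb x hx with hx' | hx'
            · rcases List.mem_append.1 hx' with hx'' | hx''
              · exact Or.inl hx''
              · simp at hx''
                subst hx''
                exact Or.inr ⟨pvGet_mem h2, pvGet_mem h1⟩
            · exact Or.inr hx'
          · simp at hc ⊢; omega

-- ---- one node of A versus one node of the frontier form ----

theorem pvNode (tro trs : List (Int × Int × Int)) (curr : Int × Int) (depth : Int) :
    ∀ (es : List Int) (L V : List (Int × Int)) (q0 : List ((Int × Int) × Int))
      (G : List (Int × Int)), L.Perm V →
      ((es.foldl (pvAev tro trs curr depth) (L, q0 ++ G.map (fun p => (p, depth+1)))).1).Perm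
        ((es.foldl (pvBev tro trs curr) (V, G)).1) ∧
      (es.foldl (pvAev tro trs curr depth) (L, q0 ++ G.map (fun p => (p, depth+1)))).2
        = q0 ++ ((es.foldl (pvBev tro trs curr) (V, G)).2).map (fun p => (p, depth+1)) := by
  intro es
  induction es with
  | nil => intro L V q0 G h; exact ⟨h, rfl⟩
  | cons e es ih =>
    intro L V q0 G h
    rw [List.foldl_cons, List.foldl_cons]
    cases h1 : tro.find? (fun t => t.1 == curr.2 && t.2.1 == e) with
    | none =>
      have hA : pvAev tro trs curr depth (L, q0 ++ G.map (fun p => (p, depth+1))) e =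
          (PySem.List.sorted2 L (fun p => p.1) (fun p => p.2),
            q0 ++ G.map (fun p => (p, depth+1))) := by
        simp only [pvAev, h1]
      have hB : pvBev tro trs curr (V, G) e = (V, G) := by
        simp only [pvBev, pvGet, h1, Option.map_none]
      rw [hA, hB]
      exact ih _ V q0 G ((pvSort2_perm L).trans h)
    | some to_ =>
      cases h2 : trs.find? (fun t => t.1 == curr.1 && t.2.1 == e) with
      | none =>
        have hA : pvAev tro trs curr depth (L, q0 ++ G.map (fun p => (p, depth+1))) e =
            (PySem.List.sorted2 L (fun p => p.1) (fun p => p.2),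
              q0 ++ G.map (fun p => (p, depth+1))) := by
          simp only [pvAev, h1, h2]
        have hB : pvBev tro trs curr (V, G) e = (V, G) := by
          simp only [pvBev, pvGet, h1, h2, Option.map_none, Option.map_some]
        rw [hA, hB]
        exact ih _ V q0 G ((pvSort2_perm L).trans h)
      | some ts_ =>
        by_cases hm : (ts_.2.2, to_.2.2) ∈ L
        · have hmV : (ts_.2.2, to_.2.2) ∈ V := h.mem_iff.1 hm
          have hA : pvAev tro trs curr depth (L, q0 ++ G.map (fun p => (p, depth+1))) e =
              (PySem.List.sorted2 L (fun p => p.1) (fun p => p.2),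
                q0 ++ G.map (fun p => (p, depth+1))) := by
            simp only [pvAev, h1, h2, hm, if_true]
          have hB : pvBev tro trs curr (V, G) e = (V, G) := by
            simp only [pvBev, pvGet, h1, h2, Option.map_some, hmV, if_true]
          rw [hA, hB]
          exact ih _ V q0 G ((pvSort2_perm L).trans h)
        · have hmV : (ts_.2.2, to_.2.2) ∉ V := fun hc => hm (h.mem_iff.2 hc)
          have hA : pvAev tro trs curr depth (L, q0 ++ G.map (fun p => (p, depth+1))) e =
              (PySem.List.sorted2 (L ++ [(ts_.2.2, to_.2.2)]) (fun p => p.1) (fun p => p.2),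
                q0 ++ (G ++ [(ts_.2.2, to_.2.2)]).map (fun p => (p, depth+1))) := by
            simp only [pvAev, h1, h2, hm, if_false]
            simp [List.append_assoc]
          have hB : pvBev tro trs curr (V, G) e =
              (V ++ [(ts_.2.2, to_.2.2)], G ++ [(ts_.2.2, to_.2.2)]) := by
            simp only [pvBev, pvGet, h1, h2, Option.map_some, hmV, if_false]
            rw [pvSet_add_fresh hmV]
          rw [hA, hB]
          exact ih _ (V ++ [(ts_.2.2, to_.2.2)]) q0 (G ++ [(ts_.2.2, to_.2.2)])
            ((pvSort2_perm _).trans (h.append_right _))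

theorem pvAev_fold_sorted (tro trs : List (Int × Int × Int)) (curr : Int × Int) (depth : Int) :
    ∀ (es : List Int) (st : List (Int × Int) × List ((Int × Int) × Int)), es ≠ [] →
      (es.foldl (pvAev tro trs curr depth) st).1 =
        PySem.List.sorted2 (es.foldl (pvAev tro trs curr depth) st).1
          (fun p => p.1) (fun p => p.2) := by
  intro es
  induction es with
  | nil => intro st h; exact absurd rfl h
  | cons e es ih =>
    intro st _
    cases es with
    | nil =>
      simp only [List.foldl_cons, List.foldl_nil]
      show (PySem.List.sorted2 _ _ _, _).1 = _
      exact (pvSort2_idem _).symm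
    | cons e' es' => rw [List.foldl_cons]; exact ih _ (by simp)

theorem pvMain (es : List Int) (tro trs : List (Int × Int × Int)) (md : Int)
    (U : List (Int × Int))
    (hU : ∀ x : Int × Int, x.1 ∈ trs.map (fun t => t.2.2) → x.2 ∈ tro.map (fun t => t.2.2) → x ∈ U)
    (hes : es ≠ []) :
    ∀ (n fuel : Nat) (L V F G : List (Int × Int)) (d : Int),
      2*fuel + (if F = [] then 1 else 0) ≤ n →
      L.Perm V → V.Nodup → (∀ x ∈ V, x ∈ U) → d < md →
      F.length + G.length + U.length ≤ fuel + V.length →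
      (L = PySem.List.sorted2 V (fun p => p.1) (fun p => p.2) ∨ (G = [] ∧ (F = [] → V = []))) →
      pvLoopA es tro trs md fuel L (F.map (fun p => (p, d)) ++ G.map (fun p => (p, d+1))) =
        PySem.List.sorted2
          (pvRounds es tro trs (md - d - 1).toNat
            (F.foldl (pvStep es tro trs) (V, G)).1 (F.foldl (pvStep es tro trs) (V, G)).2)
          (fun p => p.1) (fun p => p.2) := by
  intro n
  induction n with
  | zero =>
    intro fuel L V F G d hn hperm hnod hsub hd hfuel hLs
    exfalso
    have hVU : V.length ≤ U.length := (List.subperm_of_subset hnod hsub).length_le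
    cases F with
    | nil => simp at hn
    | cons p F' =>
      simp only [if_neg (by simp : ¬((p :: F') = []))] at hn
      have : fuel = 0 := by omega
      subst this
      simp at hfuel
      omega
  | succ n ihn =>
    intro fuel L V F G d hn hperm hnod hsub hd hfuel hLs
    have hVU : V.length ≤ U.length := (List.subperm_of_subset hnod hsub).length_le
    cases F with
    | nil =>
      have hL : L = PySem.List.sorted2 V (fun p => p.1) (fun p => p.2) := by
        rcases hLs with h | ⟨_, h2⟩
        · exact h
        · have hV : V = [] := h2 rfl
          subst hV
          have : L = [] := hperm.eq_nil
          subst this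
          rfl
      cases G with
      | nil =>
        simp only [List.map_nil, List.nil_append, List.foldl_nil]
        rw [pvLoopA_nil, pvRounds_nil]
        exact hL
      | cons g G' =>
        simp only [List.map_nil, List.nil_append, List.foldl_nil]
        by_cases hdm : d + 1 < md
        · have hq : (g :: G').map (fun p => (p, d+1)) =
              (g :: G').map (fun p => (p, d+1)) ++
                ([] : List (Int × Int)).map (fun p => (p, (d+1)+1)) := by simp
          rw [hq]
          rw [ihn fuel L V (g :: G') [] (d+1)
            (by simp at hn ⊢; omega) hperm hnod hsub hdm
            (by simp at hfuel ⊢; omega) (Or.inl hL)]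
          have hk : (md - d - 1).toNat = (md - (d+1) - 1).toNat + 1 := by omega
          rw [hk]
          by_cases hg : (g :: G') = []
          · simp at hg
          · conv_rhs => rw [pvRounds]
            rw [if_neg hg]
        · have hdrain : ∀ x ∈ (g :: G').map (fun p => (p, d+1)), md ≤ x.2 ∨ es = [] := by
            intro x hx
            obtain ⟨a, -, rfl⟩ := List.mem_map.1 hx
            refine Or.inl ?_
            show md ≤ d + 1
            omega
          rw [pvLoopA_drain es tro trs md _ fuel L hdrain
            (by simp at hfuel ⊢; omega)]
          have hk : (md - d - 1).toNat = 0 := by omega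
          rw [hk]
          rw [show pvRounds es tro trs 0 V (g :: G') = V from rfl]
          exact hL
    | cons p F' =>
      cases fuel with
      | zero =>
        exfalso
        simp at hfuel
        omega
      | succ f =>
        simp only [List.map_cons, List.cons_append]
        rw [pvLoopA_cons]
        rw [if_neg (by omega : ¬ md ≤ d)]
        show pvLoopA es tro trs md f
            (es.foldl (pvAev tro trs p d) (L, F'.map (fun p => (p, d)) ++ G.map (fun p => (p, d+1)))).1
            (es.foldl (pvAev tro trs p d) (L, F'.map (fun p => (p, d)) ++ G.map (fun p => (p, d+1)))).2
          = _
        obtain ⟨hp1, hp2⟩ := pvNode tro trs p d es L V (F'.map (fun p => (p, d))) G hperm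
        obtain ⟨hq1, hq2, hq3⟩ := pvBev_fold_props tro trs p es V G hnod
        rw [hp2]
        have hsort : (es.foldl (pvAev tro trs p d) (L, F'.map (fun p => (p, d)) ++ G.map (fun p => (p, d+1)))).1
            = PySem.List.sorted2 (es.foldl (pvBev tro trs p) (V, G)).1 (fun p => p.1) (fun p => p.2) := by
          rw [pvAev_fold_sorted tro trs p d es _ hes]
          exact pvSort2_congr hp1
        rw [ihn f _ (es.foldl (pvBev tro trs p) (V, G)).1 F' (es.foldl (pvBev tro trs p) (V, G)).2 d
          (by by_cases hF : F' = [] <;> simp [hF] at hn ⊢ <;> omega)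
          hp1 hq1
          (by
            intro x hx
            rcases hq2 x hx with hx' | hx'
            · exact hsub x hx'
            · exact hU x hx'.1 hx'.2)
          hd
          (by simp at hfuel ⊢; omega)
          (Or.inl hsort)]
        rw [List.foldl_cons]
        rw [show pvStep es tro trs (V, G) p = es.foldl (pvBev tro trs p) (V, G) from rfl]

theorem pvA_eq (sio sis es : List Int) (tro trs : List (Int × Int × Int)) (md : Int) :
    generate_states_closed_loop_system sio sis es tro trs md =
      pvLoopA es tro trs md
        (sis.length * sio.length + trs.length * tro.length + 1)
        (pvSeeds sio sis) ((pvSeeds sio sis).map (fun p => (p, (0 : Int)))) := by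
  unfold generate_states_closed_loop_system
  rw [pvInit_eq]

-- ---- A's two result shapes ----

theorem pvA_drain_eq (sio sis es : List Int) (tro trs : List (Int × Int × Int)) (md : Int)
    (h : md ≤ 0 ∨ es = []) :
    generate_states_closed_loop_system sio sis es tro trs md = pvSeeds sio sis := by
  rw [pvA_eq]
  apply pvLoopA_drain
  · intro x hx
    obtain ⟨a, -, rfl⟩ := List.mem_map.1 hx
    rcases h with h | h
    · exact Or.inl (by show md ≤ 0; exact h)
    · exact Or.inr h
  · rw [List.length_map]
    have := pvSeeds_len sio sis
    omega

theorem pvA_rounds_eq (sio sis es : List Int) (tro trs : List (Int × Int × Int)) (md : Int)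
    (hmd : 0 < md) (hes : es ≠ []) :
    generate_states_closed_loop_system sio sis es tro trs md =
      PySem.List.sorted2
        (pvRounds es tro trs md.toNat (pvSeeds sio sis) (pvSeeds sio sis))
        (fun p => p.1) (fun p => p.2) := by
  rw [pvA_eq]
  have hUmem : ∀ x : Int × Int, x.1 ∈ trs.map (fun t => t.2.2) →
      x.2 ∈ tro.map (fun t => t.2.2) →
      x ∈ pvSeeds sio sis ++ ((trs.map (fun t => t.2.2)) ×ˢ (tro.map (fun t => t.2.2))) := by
    intro x h1 h2
    refine List.mem_append.2 (Or.inr ?_)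
    have h3 : (x.1, x.2) ∈ (trs.map (fun t => t.2.2)) ×ˢ (tro.map (fun t => t.2.2)) :=
      List.pair_mem_product.2 ⟨h1, h2⟩
    simpa using h3
  have hnod := pvSeeds_nodup sio sis
  have hq : (pvSeeds sio sis).map (fun p => (p, (0 : Int))) =
      (pvSeeds sio sis).map (fun p => (p, (0 : Int))) ++
        ([] : List (Int × Int)).map (fun p => (p, (0 : Int) + 1)) := by simp
  rw [hq]
  rw [pvMain es tro trs md
    (pvSeeds sio sis ++ ((trs.map (fun t => t.2.2)) ×ˢ (tro.map (fun t => t.2.2))))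
    hUmem hes
    (2 * (sis.length * sio.length + trs.length * tro.length + 1) + 1) _
    (pvSeeds sio sis) (pvSeeds sio sis) (pvSeeds sio sis) [] 0
    (by by_cases hSnil : pvSeeds sio sis = [] <;> simp [hSnil])
    (List.Perm.refl _) hnod
    (fun x hx => List.mem_append.2 (Or.inl hx))
    (by omega)
    (by
      have h1 := pvSeeds_len sio sis
      rw [List.length_append, List.length_product _ _, List.length_map, List.length_map]
      simp only [List.length_nil]
      omega)
    (Or.inr ⟨rfl, fun h => h⟩)]
  have hrounds :
      pvRounds es tro trs (md - 0 - 1).toNat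
        ((pvSeeds sio sis).foldl (pvStep es tro trs) (pvSeeds sio sis, [])).1
        ((pvSeeds sio sis).foldl (pvStep es tro trs) (pvSeeds sio sis, [])).2 =
      pvRounds es tro trs md.toNat (pvSeeds sio sis) (pvSeeds sio sis) := by
    have hk : md.toNat = (md - 0 - 1).toNat + 1 := by omega
    rw [hk]
    by_cases hSnil : pvSeeds sio sis = []
    · rw [hSnil]
      simp [pvRounds_nil, pvRounds]
    · conv_rhs => rw [pvRounds]
      rw [if_neg hSnil]
  rw [hrounds]

-- ---- the dict `.items()` helper: first binding of each key ----

theorem pvItemsAux_eq : ∀ (n m : Nat) (l : List (Int × Int × Int)), l.length ≤ n →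
    l.length ≤ m → pvItemsAux n l = pvItemsAux m l := by
  intro n
  induction n with
  | zero =>
    intro m l h1 h2
    cases l with
    | nil => cases m <;> rfl
    | cons t r => simp at h1
  | succ n ih =>
    intro m l h1 h2
    cases l with
    | nil => cases m <;> rfl
    | cons t r =>
      cases m with
      | zero => simp at h2
      | succ m =>
        show t :: pvItemsAux n (r.filter (fun u => !pvSameKey t u)) =
          t :: pvItemsAux m (r.filter (fun u => !pvSameKey t u))
        congr 1
        have hf : (r.filter (fun u => !pvSameKey t u)).length ≤ r.length :=
          List.length_filter_le _ _
        exact ih m _ (le_trans hf (by simpa using h1)) (le_trans hf (by simpa using h2))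

theorem pvItems_nil : pvItems [] = [] := rfl

theorem pvItems_cons (t : Int × Int × Int) (r : List (Int × Int × Int)) :
    pvItems (t :: r) = t :: pvItems (r.filter (fun u => !pvSameKey t u)) := by
  show t :: pvItemsAux r.length (r.filter (fun u => !pvSameKey t u)) = _
  congr 1
  exact pvItemsAux_eq r.length _ _ (List.length_filter_le _ _) le_rfl

theorem pvFind?_cons_pos {T : Type} (p : T → Bool) (t : T) (l : List T) (h : p t = true) :
    (t :: l).find? p = some t := by
  simp [List.find?_cons, h]

theorem pvFind?_cons_neg {T : Type} (p : T → Bool) (t : T) (l : List T) (h : p t = false) :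
    (t :: l).find? p = l.find? p := by
  simp [List.find?_cons, h]

theorem pvItems_ind (P : List (Int × Int × Int) → Prop)
    (h0 : P [])
    (h1 : ∀ t r, P (r.filter (fun u => !pvSameKey t u)) → P (t :: r)) : ∀ l, P l := by
  suffices h : ∀ (n : Nat) (l : List (Int × Int × Int)), l.length ≤ n → P l from
    fun l => h l.length l le_rfl
  intro n
  induction n with
  | zero =>
    intro l hl
    cases l with
    | nil => exact h0
    | cons a b => simp at hl
  | succ n ih =>
    intro l hl
    cases l with
    | nil => exact h0
    | cons t r =>
      refine h1 t r (ih _ (le_trans (List.length_filter_le _ _) ?_))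
      simpa using hl

theorem pvItems_subset : ∀ (l : List (Int × Int × Int)), ∀ x ∈ pvItems l, x ∈ l := by
  intro l
  induction l using pvItems_ind with
  | h0 => intro x hx; simp [pvItems_nil] at hx
  | h1 t r ih =>
    intro x hx
    rw [pvItems_cons] at hx
    rcases List.mem_cons.1 hx with h | h
    · exact h ▸ List.mem_cons_self
    · exact List.mem_cons_of_mem _ (List.mem_of_mem_filter (ih x h))

theorem pvFind?_filter {T : Type} (p Q : T → Bool)
    (h : ∀ u, p u = true → Q u = true) :
    ∀ (l : List T), (l.filter Q).find? p = l.find? p := by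
  intro l
  induction l with
  | nil => simp
  | cons a l ih =>
    by_cases hp : p a = true
    · rw [List.filter_cons, if_pos (h a hp), pvFind?_cons_pos p a _ hp,
        pvFind?_cons_pos p a _ hp]
    · have hp' : p a = false := by simpa using hp
      rw [pvFind?_cons_neg p a _ hp', List.filter_cons]
      by_cases hq : Q a = true
      · rw [if_pos hq, pvFind?_cons_neg p a _ hp', ih]
      · rw [if_neg hq, ih]

theorem pvItems_find? : ∀ (l : List (Int × Int × Int)) (a b : Int),
    (pvItems l).find? (fun u => u.1 == a && u.2.1 == b) =
      l.find? (fun u => u.1 == a && u.2.1 == b) := by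
  intro l
  induction l using pvItems_ind with
  | h0 => intro a b; simp [pvItems_nil]
  | h1 t r ih =>
    intro a b
    rw [pvItems_cons]
    by_cases hp : (t.1 == a && t.2.1 == b) = true
    · rw [pvFind?_cons_pos (fun u => u.1 == a && u.2.1 == b) t _ hp,
        pvFind?_cons_pos (fun u => u.1 == a && u.2.1 == b) t _ hp]
    · have hp' : (t.1 == a && t.2.1 == b) = false := by simpa using hp
      rw [pvFind?_cons_neg (fun u => u.1 == a && u.2.1 == b) t _ hp',
        pvFind?_cons_neg (fun u => u.1 == a && u.2.1 == b) t _ hp', ih]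
      apply pvFind?_filter
      intro u hu
      simp only [Bool.and_eq_true, beq_iff_eq] at hu hp
      simp only [pvSameKey]
      cases hb1 : (u.1 == t.1) <;> cases hb2 : (u.2.1 == t.2.1) <;> simp_all

theorem pvItems_mem_find? : ∀ (l : List (Int × Int × Int)), ∀ t ∈ pvItems l,
    (pvItems l).find? (fun u => u.1 == t.1 && u.2.1 == t.2.1) = some t := by
  intro l
  induction l using pvItems_ind with
  | h0 => intro t ht; simp [pvItems_nil] at ht
  | h1 h r ih =>
    intro t ht
    rw [pvItems_cons] at ht ⊢
    rcases List.mem_cons.1 ht with heq | hmem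
    · subst heq
      exact pvFind?_cons_pos _ _ _ (by simp)
    · have hQmem : t ∈ r.filter (fun u => !pvSameKey h u) := pvItems_subset _ t hmem
      have hQ : (!pvSameKey h t) = true := (List.mem_filter.1 hQmem).2
      have hne : ¬ (h.1 = t.1 ∧ h.2.1 = t.2.1) := by
        simp only [pvSameKey, Bool.not_eq_eq_eq_not, Bool.not_true, Bool.and_eq_false_iff,
          beq_eq_false_iff_ne, ne_eq] at hQ
        rintro ⟨h1, h2⟩
        rcases hQ with hQ | hQ <;> omega
      have hf : (h.1 == t.1 && h.2.1 == t.2.1) = false := by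
        cases hb1 : (h.1 == t.1) <;> cases hb2 : (h.2.1 == t.2.1) <;> simp_all
      rw [pvFind?_cons_neg (fun u => u.1 == t.1 && u.2.1 == t.2.1) h _ hf]
      exact ih t hmem

theorem pvMem_items_iff (l : List (Int × Int × Int)) (t : Int × Int × Int) :
    t ∈ pvItems l ↔ l.find? (fun u => u.1 == t.1 && u.2.1 == t.2.1) = some t := by
  constructor
  · intro h
    rw [← pvItems_find?]
    exact pvItems_mem_find? l t h
  · intro h
    rw [← pvItems_find?] at h
    exact List.mem_of_find?_eq_some h

-- ---- the per-event group of origin transitions ----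

theorem pvByEvent_getD_aux (evs : PySem.Set Int) :
    ∀ (l : List (Int × Int × Int)) (d : PySem.Dict Int (List (Int × Int))) (e : Int),
      (l.foldl
        (fun d t =>
          if t.2.1 ∈ evs then d.modify t.2.1 [] (fun L => L ++ [(t.1, t.2.2)]) else d) d).getD e []
        = d.getD e [] ++
            (l.filter (fun t => t.2.1 == e && decide (t.2.1 ∈ evs))).map (fun t => (t.1, t.2.2)) := by
  intro l
  induction l with
  | nil => intro d e; simp
  | cons t r ih =>
    intro d e
    rw [List.foldl_cons]
    by_cases hev : t.2.1 ∈ evs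
    · rw [if_pos hev, ih, PySem.Dict.getD_modify]
      by_cases he : e = t.2.1
      · subst he
        rw [if_pos rfl, List.filter_cons, if_pos (by simp [hev]), List.map_cons]
        simp
      · rw [if_neg he, List.filter_cons,
          if_neg (by simp [hev]; intro hc; exact absurd hc.symm he)]
    · rw [if_neg hev, ih, List.filter_cons, if_neg (by simp [hev])]

theorem pvByEvent_getD (evs : PySem.Set Int) (tro : List (Int × Int × Int)) (e : Int) :
    (pvByEvent evs tro).getD e [] =
      ((pvItems tro).filter (fun t => t.2.1 == e && decide (t.2.1 ∈ evs))).map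
        (fun t => (t.1, t.2.2)) := by
  unfold pvByEvent
  rw [pvByEvent_getD_aux]
  simp [PySem.Dict.getD_empty]

-- ---- the joined product relation is exactly the one-step relation ----

def pvRstep (es : List Int) (tro trs : List (Int × Int × Int)) (p x : Int × Int) : Prop :=
  ∃ e ∈ es, pvGet tro p.2 e = some x.2 ∧ pvGet trs p.1 e = some x.1

theorem pvEdges_eq_flatMap (events : PySem.Set Int) (tro trs : List (Int × Int × Int)) :
    pvEdges events tro trs =
      (pvItems trs).flatMap
        (fun t => ((pvByEvent events tro).getD t.2.1 []).map
          (fun q => ((t.1, q.1), (t.2.2, q.2)))) := by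
  unfold pvEdges
  rw [PySem.List.foldl_append_eq_flatMap]
  simp

theorem pvEdges_mem (es : List Int) (tro trs : List (Int × Int × Int)) (p x : Int × Int) :
    ((p, x) ∈ pvEdges (PySem.Set.ofList es) tro trs) ↔ pvRstep es tro trs p x := by
  rw [pvEdges_eq_flatMap]
  simp only [List.mem_flatMap, List.mem_map]
  constructor
  · rintro ⟨t, ht, q, hq, heq⟩
    rw [pvByEvent_getD] at hq
    obtain ⟨u, hu, hq⟩ := List.mem_map.1 hq
    obtain ⟨humem, hupred⟩ := List.mem_filter.1 hu
    simp only [Bool.and_eq_true, beq_iff_eq, decide_eq_true_eq] at hupred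
    obtain ⟨hue, huev⟩ := hupred
    have hpx : p = (t.1, q.1) ∧ x = (t.2.2, q.2) := by
      have h1 := congrArg Prod.fst heq
      have h2 := congrArg Prod.snd heq
      exact ⟨h1.symm, h2.symm⟩
    obtain ⟨hp, hx⟩ := hpx
    refine ⟨t.2.1, (PySem.Set.mem_ofList _ _).1 (hue ▸ huev), ?_, ?_⟩
    · have hfu : tro.find? (fun v => v.1 == u.1 && v.2.1 == u.2.1) = some u :=
        (pvMem_items_iff tro u).1 humem
      have : p.2 = u.1 := by rw [hp, ← hq]
      rw [pvGet, this, ← hue, hfu]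
      rw [hx, ← hq]
      simp
    · have hft : trs.find? (fun v => v.1 == t.1 && v.2.1 == t.2.1) = some t :=
        (pvMem_items_iff trs t).1 ht
      have : p.1 = t.1 := by rw [hp]
      rw [pvGet, this, hft]
      rw [hx]
      simp
  · rintro ⟨e, he, ho, hs⟩
    rw [pvGet] at ho hs
    obtain ⟨u, hfu, hu2⟩ : ∃ u, tro.find? (fun v => v.1 == p.2 && v.2.1 == e) = some u ∧ u.2.2 = x.2 := by
      cases hf : tro.find? (fun v => v.1 == p.2 && v.2.1 == e) with
      | none => rw [hf] at ho; simp at ho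
      | some u => rw [hf] at ho; simp at ho; exact ⟨u, rfl, ho⟩
    obtain ⟨t, hft, ht2⟩ : ∃ t, trs.find? (fun v => v.1 == p.1 && v.2.1 == e) = some t ∧ t.2.2 = x.1 := by
      cases hf : trs.find? (fun v => v.1 == p.1 && v.2.1 == e) with
      | none => rw [hf] at hs; simp at hs
      | some t => rw [hf] at hs; simp at hs; exact ⟨t, rfl, hs⟩
    have hukey : u.1 = p.2 ∧ u.2.1 = e := by
      have := List.find?_some hfu
      simpa using this
    have htkey : t.1 = p.1 ∧ t.2.1 = e := by
      have := List.find?_some hft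
      simpa using this
    refine ⟨t, ?_, (u.1, u.2.2), ?_, ?_⟩
    · rw [pvMem_items_iff, htkey.1, htkey.2]
      exact hft
    · rw [pvByEvent_getD]
      refine List.mem_map.2 ⟨u, List.mem_filter.2 ⟨?_, ?_⟩, rfl⟩
      · rw [pvMem_items_iff, hukey.1, hukey.2]
        exact hfu
      · simp only [Bool.and_eq_true, beq_iff_eq, decide_eq_true_eq]
        exact ⟨by rw [hukey.2, htkey.2], by
          rw [hukey.2]
          exact (PySem.Set.mem_ofList _ _).2 he⟩
    · rw [ht2, hu2, hukey.1, htkey.1]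

theorem pvRstep_cons (e : Int) (es : List Int) (tro trs : List (Int × Int × Int))
    (p x : Int × Int) :
    pvRstep (e :: es) tro trs p x ↔
      ((pvGet tro p.2 e = some x.2 ∧ pvGet trs p.1 e = some x.1) ∨ pvRstep es tro trs p x) := by
  constructor
  · rintro ⟨e', he', h⟩
    rcases List.mem_cons.1 he' with rfl | hmem
    · exact Or.inl h
    · exact Or.inr ⟨e', hmem, h⟩
  · rintro (h | ⟨e', he', h⟩)
    · exact ⟨e, List.mem_cons_self, h⟩
    · exact ⟨e', List.mem_cons_of_mem _ he', h⟩

-- ---- membership through the frontier machinery ----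

theorem pvBev_fold_mem (tro trs : List (Int × Int × Int)) (p : Int × Int) :
    ∀ (es : List Int) (V G : List (Int × Int)), (∀ y ∈ G, y ∈ V) →
      (∀ x, x ∈ (es.foldl (pvBev tro trs p) (V, G)).1 ↔ x ∈ V ∨ pvRstep es tro trs p x) ∧
      (∀ x, x ∈ (es.foldl (pvBev tro trs p) (V, G)).2 ↔
        x ∈ G ∨ (pvRstep es tro trs p x ∧ x ∉ V)) := by
  intro es
  induction es with
  | nil =>
    intro V G hGV
    constructor <;> intro x <;> simp [pvRstep]
  | cons e es ih =>
    intro V G hGV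
    rw [List.foldl_cons]
    cases h1 : pvGet tro p.2 e with
    | none =>
      have hstep : pvBev tro trs p (V, G) e = (V, G) := by
        cases h2 : pvGet trs p.1 e <;> simp only [pvBev, h1, h2]
      rw [hstep]
      obtain ⟨ha, hb⟩ := ih V G hGV
      have hhead : ∀ x : Int × Int,
          ¬ (pvGet tro p.2 e = some x.2 ∧ pvGet trs p.1 e = some x.1) := by
        intro x hc
        rw [h1] at hc
        exact absurd hc.1 (by simp)
      constructor <;> intro x
      · rw [ha x, pvRstep_cons]
        have := hhead x
        tauto
      · rw [hb x, pvRstep_cons]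
        have := hhead x
        tauto
    | some next_o =>
      cases h2 : pvGet trs p.1 e with
      | none =>
        have hstep : pvBev tro trs p (V, G) e = (V, G) := by
          simp only [pvBev, h1, h2]
        rw [hstep]
        obtain ⟨ha, hb⟩ := ih V G hGV
        have hhead : ∀ x : Int × Int,
            ¬ (pvGet tro p.2 e = some x.2 ∧ pvGet trs p.1 e = some x.1) := by
          intro x hc
          rw [h2] at hc
          exact absurd hc.2 (by simp)
        constructor <;> intro x
        · rw [ha x, pvRstep_cons]
          have := hhead x
          tauto
        · rw [hb x, pvRstep_cons]
          have := hhead x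
          tauto
      | some next_s =>
        have hhead : ∀ x : Int × Int,
            (pvGet tro p.2 e = some x.2 ∧ pvGet trs p.1 e = some x.1) ↔ x = (next_s, next_o) := by
          intro x
          constructor
          · rintro ⟨hxo, hxs⟩
            rw [h1] at hxo
            rw [h2] at hxs
            have h3 : x.2 = next_o := by simpa using hxo.symm
            have h4 : x.1 = next_s := by simpa using hxs.symm
            exact Prod.ext h4 h3
          · rintro rfl
            exact ⟨h1, h2⟩
        by_cases hm : (next_s, next_o) ∈ V
        · have hstep : pvBev tro trs p (V, G) e = (V, G) := by
            simp only [pvBev, h1, h2, hm, if_true]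
          rw [hstep]
          obtain ⟨ha, hb⟩ := ih V G hGV
          constructor <;> intro x
          · rw [ha x, pvRstep_cons, hhead x]
            constructor
            · tauto
            · rintro (h | (rfl | h)) <;> tauto
          · rw [hb x, pvRstep_cons, hhead x]
            constructor
            · tauto
            · rintro (h | ⟨(rfl | h), hv⟩) <;> tauto
        · have hstep : pvBev tro trs p (V, G) e =
              (V ++ [(next_s, next_o)], G ++ [(next_s, next_o)]) := by
            simp only [pvBev, h1, h2, hm, if_false]
            rw [pvSet_add_fresh hm]
          rw [hstep]
          have hGV' : ∀ y ∈ G ++ [(next_s, next_o)], y ∈ V ++ [(next_s, next_o)] := by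
            intro y hy
            rcases List.mem_append.1 hy with hy | hy
            · exact List.mem_append.2 (Or.inl (hGV y hy))
            · exact List.mem_append.2 (Or.inr hy)
          obtain ⟨ha, hb⟩ := ih (V ++ [(next_s, next_o)]) (G ++ [(next_s, next_o)]) hGV'
          constructor <;> intro x
          · rw [ha x, pvRstep_cons, hhead x, List.mem_append]
            simp only [List.mem_singleton]
            tauto
          · rw [hb x, pvRstep_cons, hhead x, List.mem_append, List.mem_append]
            simp only [List.mem_singleton]
            by_cases hxy : x = (next_s, next_o)
            · subst hxy
              tauto
            · tauto

theorem pvStep_fold_mem (es : List Int) (tro trs : List (Int × Int × Int)) :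
    ∀ (front : List (Int × Int)) (V G : List (Int × Int)), (∀ y ∈ G, y ∈ V) →
      (∀ x, x ∈ (front.foldl (pvStep es tro trs) (V, G)).1 ↔
        x ∈ V ∨ ∃ p ∈ front, pvRstep es tro trs p x) ∧
      (∀ x, x ∈ (front.foldl (pvStep es tro trs) (V, G)).2 ↔
        x ∈ G ∨ ∃ p ∈ front, pvRstep es tro trs p x ∧ x ∉ V) := by
  intro front
  induction front with
  | nil =>
    intro V G hGV
    constructor <;> intro x <;> simp
  | cons p front ih =>
    intro V G hGV
    rw [List.foldl_cons,
      show pvStep es tro trs (V, G) p =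
        ((es.foldl (pvBev tro trs p) (V, G)).1, (es.foldl (pvBev tro trs p) (V, G)).2) from rfl]
    obtain ⟨ha, hb⟩ := pvBev_fold_mem tro trs p es V G hGV
    have hGV1 : ∀ y ∈ (es.foldl (pvBev tro trs p) (V, G)).2,
        y ∈ (es.foldl (pvBev tro trs p) (V, G)).1 := by
      intro y hy
      rcases (hb y).1 hy with hy' | hy'
      · exact (ha y).2 (Or.inl (hGV y hy'))
      · exact (ha y).2 (Or.inr hy'.1)
    obtain ⟨ha', hb'⟩ := ih _ _ hGV1
    have hmc : ∀ (x : Int × Int),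
        (∃ q ∈ p :: front, pvRstep es tro trs q x) ↔
          (pvRstep es tro trs p x ∨ ∃ q ∈ front, pvRstep es tro trs q x) := by
      intro x
      constructor
      · rintro ⟨q, hq, h⟩
        rcases List.mem_cons.1 hq with rfl | hq
        · exact Or.inl h
        · exact Or.inr ⟨q, hq, h⟩
      · rintro (h | ⟨q, hq, h⟩)
        · exact ⟨p, List.mem_cons_self, h⟩
        · exact ⟨q, List.mem_cons_of_mem _ hq, h⟩
    constructor <;> intro x
    · rw [ha' x, ha x, hmc x]
      tauto
    · rw [hb' x, hb x]
      constructor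
      · rintro ((h | ⟨hs, hvv⟩) | ⟨q, hq, h, hv1⟩)
        · exact Or.inl h
        · exact Or.inr ⟨p, List.mem_cons_self, hs, hvv⟩
        · have hv : x ∉ V := fun hc => hv1 ((ha x).2 (Or.inl hc))
          exact Or.inr ⟨q, List.mem_cons_of_mem _ hq, h, hv⟩
      · rintro (h | ⟨q, hq, h, hv⟩)
        · exact Or.inl (Or.inl h)
        · rcases List.mem_cons.1 hq with rfl | hq
          · exact Or.inl (Or.inr ⟨h, hv⟩)
          · by_cases hv1 : x ∈ (es.foldl (pvBev tro trs p) (V, G)).1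
            · rcases (ha x).1 hv1 with hc | hc
              · exact absurd hc hv
              · exact Or.inl (Or.inr ⟨hc, hv⟩)
            · exact Or.inr ⟨q, hq, h, hv1⟩

theorem pvStep_fold_nodup (es : List Int) (tro trs : List (Int × Int × Int)) :
    ∀ (front : List (Int × Int)) (V G : List (Int × Int)), V.Nodup →
      ((front.foldl (pvStep es tro trs) (V, G)).1).Nodup := by
  intro front
  induction front with
  | nil => intro V G h; exact h
  | cons p front ih =>
    intro V G h
    rw [List.foldl_cons]
    exact ih _ _ (pvBev_fold_props tro trs p es V G h).1

-- ---- the abstract n-step closure both searches compute ----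

def pvRclos (es : List Int) (tro trs : List (Int × Int × Int)) :
    Nat → ((Int × Int) → Prop) → ((Int × Int) → Prop)
  | 0, S => S
  | n+1, S => fun x =>
      pvRclos es tro trs n S x ∨ ∃ p, pvRclos es tro trs n S p ∧ pvRstep es tro trs p x

theorem pvRclos_congr (es : List Int) (tro trs : List (Int × Int × Int))
    {S T : (Int × Int) → Prop} (h : ∀ y, S y ↔ T y) :
    ∀ (n : Nat) (x : Int × Int), pvRclos es tro trs n S x ↔ pvRclos es tro trs n T x := by
  intro n
  induction n with
  | zero => exact h
  | succ n ih =>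
    intro x
    show (pvRclos es tro trs n S x ∨ _) ↔ (pvRclos es tro trs n T x ∨ _)
    rw [ih x]
    constructor <;> rintro (h' | ⟨p, hp, hs⟩)
    · exact Or.inl h'
    · exact Or.inr ⟨p, (ih p).1 hp, hs⟩
    · exact Or.inl h'
    · exact Or.inr ⟨p, (ih p).2 hp, hs⟩

theorem pvRclos_shift (es : List Int) (tro trs : List (Int × Int × Int)) :
    ∀ (n : Nat) (S : (Int × Int) → Prop) (x : Int × Int),
      pvRclos es tro trs (n+1) S x ↔ pvRclos es tro trs n (pvRclos es tro trs 1 S) x := by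
  intro n
  induction n with
  | zero => intro S x; exact Iff.rfl
  | succ n ih =>
    intro S x
    show (pvRclos es tro trs (n+1) S x ∨ _) ↔ (pvRclos es tro trs n (pvRclos es tro trs 1 S) x ∨ _)
    rw [ih S x]
    constructor <;> rintro (h' | ⟨p, hp, hs⟩)
    · exact Or.inl h'
    · exact Or.inr ⟨p, (ih S p).1 hp, hs⟩
    · exact Or.inl h'
    · exact Or.inr ⟨p, (ih S p).2 hp, hs⟩

theorem pvRclos_closed (es : List Int) (tro trs : List (Int × Int × Int))
    {S : (Int × Int) → Prop} (hcl : ∀ p x, S p → pvRstep es tro trs p x → S x) :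
    ∀ (n : Nat) (x : Int × Int), pvRclos es tro trs n S x ↔ S x := by
  intro n
  induction n with
  | zero => intro x; exact Iff.rfl
  | succ n ih =>
    intro x
    show (pvRclos es tro trs n S x ∨ _) ↔ S x
    constructor
    · rintro (h | ⟨p, hp, hs⟩)
      · exact (ih x).1 h
      · exact hcl p x ((ih p).1 hp) hs
    · intro h
      exact Or.inl ((ih x).2 h)

theorem pvRounds_mem (es : List Int) (tro trs : List (Int × Int × Int)) :
    ∀ (n : Nat) (V F : List (Int × Int)),
      V.Nodup → (∀ y ∈ F, y ∈ V) →
      (∀ p x, p ∈ V → p ∉ F → pvRstep es tro trs p x → x ∈ V) →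
      ∀ x, x ∈ pvRounds es tro trs n V F ↔ pvRclos es tro trs n (· ∈ V) x := by
  intro n
  induction n with
  | zero => intro V F _ _ _ x; exact Iff.rfl
  | succ n ih =>
    intro V F hnod hFV hcl x
    by_cases hF : F = []
    · subst hF
      rw [pvRounds_nil]
      have hcl' : ∀ p y, p ∈ V → pvRstep es tro trs p y → y ∈ V := by
        intro p y hp hs
        exact hcl p y hp (by simp) hs
      exact (pvRclos_closed es tro trs hcl' (n+1) x).symm
    · rw [pvRounds, if_neg hF]
      obtain ⟨h1, h2⟩ := pvStep_fold_mem es tro trs F V [] (by simp)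
      have hnod1 : ((F.foldl (pvStep es tro trs) (V, [])).1).Nodup :=
        pvStep_fold_nodup es tro trs F V [] hnod
      have hsub : ∀ y ∈ (F.foldl (pvStep es tro trs) (V, [])).2,
          y ∈ (F.foldl (pvStep es tro trs) (V, [])).1 := by
        intro y hy
        rcases (h2 y).1 hy with hy' | ⟨p, hp, hs, _⟩
        · simp at hy'
        · exact (h1 y).2 (Or.inr ⟨p, hp, hs⟩)
      have hcl' : ∀ p y, p ∈ (F.foldl (pvStep es tro trs) (V, [])).1 →
          p ∉ (F.foldl (pvStep es tro trs) (V, [])).2 →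
          pvRstep es tro trs p y → y ∈ (F.foldl (pvStep es tro trs) (V, [])).1 := by
        intro p y hp hpn hs
        rcases (h1 p).1 hp with hpV | ⟨p', hp', hs'⟩
        · by_cases hpF : p ∈ F
          · exact (h1 y).2 (Or.inr ⟨p, hpF, hs⟩)
          · exact (h1 y).2 (Or.inl (hcl p y hpV hpF hs))
        · by_cases hpV : p ∈ V
          · by_cases hpF : p ∈ F
            · exact (h1 y).2 (Or.inr ⟨p, hpF, hs⟩)
            · exact (h1 y).2 (Or.inl (hcl p y hpV hpF hs))
          · exact absurd ((h2 p).2 (Or.inr ⟨p', hp', hs', hpV⟩)) hpn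
      rw [ih _ _ hnod1 hsub hcl' x]
      have hS1 : ∀ y, (y ∈ (F.foldl (pvStep es tro trs) (V, [])).1) ↔
          pvRclos es tro trs 1 (· ∈ V) y := by
        intro y
        rw [h1 y]
        show _ ↔ (y ∈ V ∨ ∃ p, p ∈ V ∧ pvRstep es tro trs p y)
        constructor
        · rintro (h | ⟨p, hp, hs⟩)
          · exact Or.inl h
          · exact Or.inr ⟨p, hFV p hp, hs⟩
        · rintro (h | ⟨p, hp, hs⟩)
          · exact Or.inl h
          · by_cases hpF : p ∈ F
            · exact Or.inr ⟨p, hpF, hs⟩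
            · exact Or.inl (hcl p y hp hpF hs)
      rw [pvRclos_congr es tro trs hS1 n x]
      exact (pvRclos_shift es tro trs n _ x).symm

theorem pvRounds_nodup (es : List Int) (tro trs : List (Int × Int × Int)) :
    ∀ (n : Nat) (V F : List (Int × Int)), V.Nodup → (pvRounds es tro trs n V F).Nodup := by
  intro n
  induction n with
  | zero => intro V F h; exact h
  | succ n ih =>
    intro V F h
    by_cases hF : F = []
    · subst hF; rw [pvRounds_nil]; exact h
    · rw [pvRounds, if_neg hF]
      exact ih _ _ (pvStep_fold_nodup es tro trs F V [] h)

-- ---- the saturation loop computes the same closure ----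

theorem pvSat_mem (edges : List ((Int × Int) × (Int × Int))) (es : List Int)
    (tro trs : List (Int × Int × Int))
    (hedge : ∀ p x, ((p, x) ∈ edges) ↔ pvRstep es tro trs p x) :
    ∀ (n : Nat) (reach : List (Int × Int)) (x : Int × Int),
      x ∈ pvSat edges n reach ↔ pvRclos es tro trs n (· ∈ reach) x := by
  intro n
  induction n with
  | zero => intro reach x; exact Iff.rfl
  | succ n ih =>
    intro reach x
    have hnw : ∀ y, (y ∈ PySem.Set.diff
        (PySem.Set.ofList
          ((edges.filter (fun pq => decide (pq.1 ∈ reach))).map (fun pq => pq.2))) reach) ↔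
        ((∃ p ∈ reach, pvRstep es tro trs p y) ∧ y ∉ reach) := by
      intro y
      rw [PySem.Set.mem_diff]
      constructor
      · rintro ⟨hy, hyn⟩
        refine ⟨?_, hyn⟩
        obtain ⟨pq, hpq, hq⟩ := List.mem_map.1 ((PySem.Set.mem_ofList _ _).1 hy)
        obtain ⟨hmem, hpred⟩ := List.mem_filter.1 hpq
        refine ⟨pq.1, by simpa using hpred, ?_⟩
        rw [← (hedge pq.1 y)]
        rw [← hq]
        exact hmem
      · rintro ⟨⟨p, hp, hs⟩, hyn⟩
        refine ⟨?_, hyn⟩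
        refine (PySem.Set.mem_ofList _ _).2 (List.mem_map.2 ⟨(p, y), ?_, rfl⟩)
        exact List.mem_filter.2 ⟨(hedge p y).2 hs, by simpa using hp⟩
    simp only [pvSat]
    by_cases hnil : PySem.Set.diff
        (PySem.Set.ofList
          ((edges.filter (fun pq => decide (pq.1 ∈ reach))).map (fun pq => pq.2))) reach = []
    · rw [if_pos hnil]
      have hcl : ∀ p y, p ∈ reach → pvRstep es tro trs p y → y ∈ reach := by
        intro p y hp hs
        by_contra hy
        have : y ∈ PySem.Set.diff
            (PySem.Set.ofList
              ((edges.filter (fun pq => decide (pq.1 ∈ reach))).map (fun pq => pq.2))) reach :=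
          (hnw y).2 ⟨⟨p, hp, hs⟩, hy⟩
        rw [hnil] at this
        simp at this
      exact (pvRclos_closed es tro trs hcl (n+1) x).symm
    · rw [if_neg hnil]
      rw [ih _ x]
      have hS1 : ∀ y, (y ∈ PySem.Set.union reach
          (PySem.Set.diff
            (PySem.Set.ofList
              ((edges.filter (fun pq => decide (pq.1 ∈ reach))).map (fun pq => pq.2))) reach)) ↔
          pvRclos es tro trs 1 (· ∈ reach) y := by
        intro y
        rw [PySem.Set.mem_union, hnw y]
        show _ ↔ (y ∈ reach ∨ ∃ p, p ∈ reach ∧ pvRstep es tro trs p y)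
        constructor
        · rintro (h | ⟨⟨p, hp, hs⟩, _⟩)
          · exact Or.inl h
          · exact Or.inr ⟨p, hp, hs⟩
        · rintro (h | ⟨p, hp, hs⟩)
          · exact Or.inl h
          · by_cases hy : y ∈ reach
            · exact Or.inl hy
            · exact Or.inr ⟨⟨p, hp, hs⟩, hy⟩
      rw [pvRclos_congr es tro trs hS1 n x]
      exact (pvRclos_shift es tro trs n _ x).symm

theorem pvSat_nodup (edges : List ((Int × Int) × (Int × Int))) :
    ∀ (n : Nat) (reach : List (Int × Int)), reach.Nodup → (pvSat edges n reach).Nodup := by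
  intro n
  induction n with
  | zero => intro reach h; exact h
  | succ n ih =>
    intro reach h
    simp only [pvSat]
    split_ifs with hnil
    · exact h
    · exact ih _ (PySem.Set.nodup_union _ _ h)

-- ---- B's seed set is A's seed list ----

theorem pvFoldAdd_flatMap {α : Type} (f : α → List (Int × Int)) :
    ∀ (l : List α) (acc : List (Int × Int)),
      (l.flatMap f).foldl PySem.Set.add acc =
        l.foldl (fun acc a => (f a).foldl PySem.Set.add acc) acc := by
  intro l
  induction l with
  | nil => intro acc; simp
  | cons a l ih => intro acc; rw [List.flatMap_cons, List.foldl_append, List.foldl_cons, ih]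

theorem pvSeedIn_eq_add (sio : List Int) (s : Int) (acc : List (Int × Int)) :
    pvSeedIn sio s acc = (sio.map (fun o => (s, o))).foldl PySem.Set.add acc := by
  unfold pvSeedIn
  rw [List.foldl_map]
  congr 1
  funext acc o
  rw [PySem.Set.add_eq_ite]

theorem pvSeedsSet_eq (sio sis : List Int) :
    PySem.Set.ofList (sis.flatMap (fun s => sio.map (fun o => (s, o)))) = pvSeeds sio sis := by
  rw [PySem.Set.ofList_eq_foldl, pvFoldAdd_flatMap]
  unfold pvSeeds
  congr 1
  funext acc s
  exact (pvSeedIn_eq_add sio s acc).symm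

-- ---- B's two result shapes ----

theorem pvB_eq (sio sis es : List Int) (tro trs : List (Int × Int × Int)) (md : Int) :
    generate_states_closed_loop_system_alt sio sis es tro trs md =
      PySem.List.sorted2
        (pvSat (pvEdges (PySem.Set.ofList es) tro trs) md.toNat (pvSeeds sio sis))
        (fun p => p.1) (fun p => p.2) := by
  unfold generate_states_closed_loop_system_alt
  rw [pvSeedsSet_eq]

theorem pvEdges_nil_events (tro trs : List (Int × Int × Int)) :
    pvEdges (PySem.Set.ofList ([] : List Int)) tro trs = [] := by
  rw [pvEdges_eq_flatMap]
  apply List.flatMap_eq_nil_iff.2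
  intro t _
  rw [pvByEvent_getD]
  have : ((pvItems tro).filter
      (fun u => u.2.1 == t.2.1 && decide (u.2.1 ∈ PySem.Set.ofList ([] : List Int)))) = [] := by
    apply List.filter_eq_nil_iff.2
    intro u _
    simp [PySem.Set.mem_ofList]
  rw [this]
  rfl

theorem pvSat_nil_edges : ∀ (n : Nat) (reach : List (Int × Int)),
    pvSat [] n reach = reach := by
  intro n reach
  cases n with
  | zero => rfl
  | succ n =>
    simp only [pvSat]
    rw [if_pos]
    apply List.eq_nil_iff_forall_not_mem.2
    intro y hy
    rw [PySem.Set.mem_diff] at hy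
    simp at hy

theorem pvB_drain_eq (sio sis es : List Int) (tro trs : List (Int × Int × Int)) (md : Int)
    (h : md ≤ 0 ∨ es = []) :
    generate_states_closed_loop_system_alt sio sis es tro trs md =
      PySem.List.sorted2 (pvSeeds sio sis) (fun p => p.1) (fun p => p.2) := by
  rw [pvB_eq]
  congr 1
  rcases h with h | h
  · have h0 : md.toNat = 0 := by omega
    rw [h0]
    rfl
  · subst h
    rw [pvEdges_nil_events, pvSat_nil_edges]

-- ---- order bookkeeping for the no-expansion corner ----

theorem pvPairwise_key (l : List (Int × Int))
    (h : List.Pairwise (fun a b : Int × Int => a.1 < b.1 ∨ (a.1 = b.1 ∧ a.2 < b.2)) l) :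
    List.Pairwise (fun a b : Int × Int => (fun p : Int × Int => toLex (p.1, p.2)) a <
      (fun p : Int × Int => toLex (p.1, p.2)) b) l := by
  refine h.imp ?_
  intro a b hab
  exact Prod.Lex.lt_iff.2 (by simpa using hab)

theorem pvSort2_eq_self (l : List (Int × Int))
    (h : List.Pairwise (fun a b : Int × Int => a.1 < b.1 ∨ (a.1 = b.1 ∧ a.2 < b.2)) l) :
    PySem.List.sorted2 l (fun p => p.1) (fun p => p.2) = l := by
  rw [pvSort2_eq]
  exact PySem.List.sorted_eq_of_perm_of_pairwise_lt l l _ (List.Perm.refl l) (pvPairwise_key l h)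

theorem pvSort2_pairwise_of_nodup (l : List (Int × Int)) (hnd : l.Nodup) :
    List.Pairwise (fun a b : Int × Int => a.1 < b.1 ∨ (a.1 = b.1 ∧ a.2 < b.2))
      (PySem.List.sorted2 l (fun p => p.1) (fun p => p.2)) := by
  rw [pvSort2_eq]
  have hle := PySem.List.sorted_pairwise l (fun p : Int × Int => toLex (p.1, p.2))
  have hnd' : (PySem.List.sorted l (fun p : Int × Int => toLex (p.1, p.2))).Nodup :=
    (PySem.List.sorted_perm l _ _).nodup_iff.2 hnd
  refine (hle.and hnd').imp ?_
  rintro a b ⟨hle', hne⟩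
  have hlt : (fun p : Int × Int => toLex (p.1, p.2)) a < (fun p : Int × Int => toLex (p.1, p.2)) b :=
    lt_of_le_of_ne hle' (fun h => hne (pvKey_inj h))
  simpa using Prod.Lex.lt_iff.1 hlt

-- ---- the no-expansion corner: when is the seed list already sorted? ----

theorem pvOfList_map_inj (g : Int → Int × Int) (hg : Function.Injective g) (xs : List Int) :
    PySem.Set.ofList (xs.map g) = (PySem.Set.ofList xs).map g := by
  induction xs using List.reverseRecOn with
  | nil => rfl
  | append_singleton ys y ih =>
    rw [List.map_append, List.map_singleton, PySem.Set.ofList_append_singleton,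
      PySem.Set.ofList_append_singleton, ih, PySem.Set.add_eq_ite, PySem.Set.add_eq_ite]
    by_cases hm : y ∈ PySem.Set.ofList ys
    · rw [if_pos hm, if_pos (List.mem_map_of_mem hm)]
    · rw [if_neg hm, if_neg (by
        intro hc
        obtain ⟨z, hz, hzy⟩ := List.mem_map.1 hc
        exact hm (hg hzy ▸ hz)), List.map_append]
      rfl

theorem pvRows_filter (sio : List Int) (s : Int) (L : List Int) :
    L.flatMap (fun s' =>
        (((PySem.Set.ofList sio).map (fun o => (s', o))).filter
          (fun y => !(PySem.Set.contains ((PySem.Set.ofList sio).map (fun o => (s, o))) y)))) =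
      (L.filter (fun y => !(y == s))).flatMap
        (fun s' => (PySem.Set.ofList sio).map (fun o => (s', o))) := by
  induction L with
  | nil => rfl
  | cons s' L ih =>
    rw [List.flatMap_cons, List.filter_cons, ih]
    by_cases hs : s' = s
    · subst hs
      have hnil : ((PySem.Set.ofList sio).map (fun o => (s', o))).filter
          (fun y => !(PySem.Set.contains ((PySem.Set.ofList sio).map (fun o => (s', o))) y)) = [] := by
        apply List.filter_eq_nil_iff.2
        intro y hy
        obtain ⟨o, ho, rfl⟩ := List.mem_map.1 hy
        have hmem : o ∈ sio := (PySem.Set.mem_ofList _ _).1 ho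
        simp [hmem]
      rw [hnil, if_neg (by simp)]
      rfl
    · have hall : ((PySem.Set.ofList sio).map (fun o => (s', o))).filter
          (fun y => !(PySem.Set.contains ((PySem.Set.ofList sio).map (fun o => (s, o))) y)) =
          (PySem.Set.ofList sio).map (fun o => (s', o)) := by
        apply List.filter_eq_self.2
        intro y hy
        obtain ⟨o, ho, rfl⟩ := List.mem_map.1 hy
        simp
        exact Or.inr (fun h => hs h.symm)
      rw [hall, if_pos (by simp [hs])]
      rfl

theorem pvSeeds_eq_prod (sio sis : List Int) :
    pvSeeds sio sis =
      (PySem.List.dedup sis).flatMap (fun s => (PySem.List.dedup sio).map (fun o => (s, o))) := by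
  rw [← pvSeedsSet_eq]
  simp only [PySem.List.dedup_eq_ofList]
  induction sis with
  | nil => rfl
  | cons s r ih =>
    rw [List.flatMap_cons, PySem.Set.ofList_append, PySem.Set.ofList_cons, List.flatMap_cons]
    rw [PySem.Set.update_eq_append_filter, ih]
    rw [pvOfList_map_inj (fun o => (s, o)) (fun a b h => congrArg Prod.snd h) sio]
    congr 1
    rw [List.filter_flatMap, PySem.Set.discard]
    exact pvRows_filter sio s (PySem.Set.ofList r)

theorem pvProd_pairwise_iff (L1 L2 : List Int) :
    List.Pairwise (fun a b : Int × Int => a.1 < b.1 ∨ (a.1 = b.1 ∧ a.2 < b.2))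
        (L1.flatMap (fun s => L2.map (fun o => (s, o)))) ↔
      (L1 = [] ∨ L2 = [] ∨ (L1.Pairwise (· < ·) ∧ L2.Pairwise (· < ·))) := by
  induction L1 with
  | nil => simp
  | cons s r ih =>
    by_cases h2 : L2 = []
    · subst h2
      have hnil : (s :: r).flatMap (fun s => List.map (fun o => (s, o)) ([] : List Int)) = [] :=
        List.flatMap_eq_nil_iff.2 (fun a _ => rfl)
      rw [hnil]
      simp
    · rw [List.flatMap_cons, List.pairwise_append, List.pairwise_map]
      constructor
      · rintro ⟨hrow, hrest, hcross⟩
        refine Or.inr (Or.inr ⟨?_, ?_⟩)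
        · obtain ⟨o0, ho0⟩ : ∃ o, o ∈ L2 := by
            cases L2 with
            | nil => exact absurd rfl h2
            | cons a l => exact ⟨a, List.mem_cons_self⟩
          refine List.pairwise_cons.2 ⟨?_, ?_⟩
          · intro s' hs'
            have hb : (s', o0) ∈ r.flatMap (fun s => L2.map (fun o => (s, o))) :=
              List.mem_flatMap.2 ⟨s', hs', List.mem_map_of_mem ho0⟩
            have hc := hcross (s, o0) (List.mem_map_of_mem ho0) (s', o0) hb
            rcases hc with hlt | ⟨_, hlt⟩
            · exact hlt
            · exact absurd hlt (lt_irrefl o0)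
          · rcases ih.1 hrest with hr | hr | hr
            · subst hr; exact List.Pairwise.nil
            · exact absurd hr h2
            · exact hr.1
        · refine hrow.imp ?_
          rintro a b (hab | ⟨-, hab⟩)
          · exact absurd hab (lt_irrefl s)
          · exact hab
      · rintro (h1 | h2' | ⟨hL1, hL2⟩)
        · simp at h1
        · exact absurd h2' h2
        · obtain ⟨hs, hr⟩ := List.pairwise_cons.1 hL1
          refine ⟨?_, ?_, ?_⟩
          · exact hL2.imp (fun hab => Or.inr ⟨rfl, hab⟩)
          · exact ih.2 (Or.inr (Or.inr ⟨hr, hL2⟩))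
          · intro a ha b hb
            obtain ⟨o, _, rfl⟩ := List.mem_map.1 ha
            obtain ⟨s', hs', hb'⟩ := List.mem_flatMap.1 hb
            obtain ⟨o', _, rfl⟩ := List.mem_map.1 hb'
            exact Or.inl (hs s' hs')

theorem pvDedup_eq_nil (l : List Int) : PySem.List.dedup l = [] ↔ l = [] := by
  constructor
  · intro h
    apply List.eq_nil_iff_forall_not_mem.2
    intro x hx
    have : x ∈ PySem.List.dedup l := (PySem.List.mem_dedup _ _).2 hx
    rw [h] at this
    simp at this
  · intro h
    subst h
    rfl

theorem pvSeeds_pairwise_iff (sio sis : List Int) :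
    List.Pairwise (fun a b : Int × Int => a.1 < b.1 ∨ (a.1 = b.1 ∧ a.2 < b.2))
        (pvSeeds sio sis) ↔
      (sis = [] ∨ sio = [] ∨
        (List.Pairwise (· < ·) (PySem.List.dedup sis) ∧
         List.Pairwise (· < ·) (PySem.List.dedup sio))) := by
  rw [pvSeeds_eq_prod, pvProd_pairwise_iff, pvDedup_eq_nil, pvDedup_eq_nil]

-- ---- assembling the main-case equality ----

theorem pvMain_case (sio sis es : List Int) (tro trs : List (Int × Int × Int)) (md : Int)
    (hmd : 0 < md) (hes : es ≠ []) :
    generate_states_closed_loop_system sio sis es tro trs md =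
      generate_states_closed_loop_system_alt sio sis es tro trs md := by
  rw [pvA_rounds_eq sio sis es tro trs md hmd hes, pvB_eq]
  apply pvSort2_congr
  have hnod := pvSeeds_nodup sio sis
  have hnd1 : (pvRounds es tro trs md.toNat (pvSeeds sio sis) (pvSeeds sio sis)).Nodup :=
    pvRounds_nodup es tro trs md.toNat _ _ hnod
  have hnd2 : (pvSat (pvEdges (PySem.Set.ofList es) tro trs) md.toNat (pvSeeds sio sis)).Nodup :=
    pvSat_nodup _ md.toNat _ hnod
  rw [List.perm_ext_iff_of_nodup hnd1 hnd2]
  intro x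
  rw [pvRounds_mem es tro trs md.toNat (pvSeeds sio sis) (pvSeeds sio sis) hnod
      (fun y hy => hy) (fun p x hp hnp _ => absurd hp hnp) x,
    pvSat_mem (pvEdges (PySem.Set.ofList es) tro trs) es tro trs
      (pvEdges_mem es tro trs) md.toNat (pvSeeds sio sis) x]

-- ===== VERDICT (by name: the statements are the Claim_ definitions above) =====
theorem generate_states_closed_loop_system_spec :
    Claim_unchanged_generate_states_closed_loop_system := by
  intro sio sis es tro trs md _hdom hnD
  show generate_states_closed_loop_system sio sis es tro trs md
      = generate_states_closed_loop_system_alt sio sis es tro trs md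
  by_cases hcond : md ≤ 0 ∨ es = []
  · have hP : sis = [] ∨ sio = [] ∨
        (List.Pairwise (· < ·) (PySem.List.dedup sis) ∧
         List.Pairwise (· < ·) (PySem.List.dedup sio)) := by
      by_contra hP
      exact hnD ⟨hcond, hP⟩
    have hpw := (pvSeeds_pairwise_iff sio sis).2 hP
    rw [pvA_drain_eq sio sis es tro trs md hcond, pvB_drain_eq sio sis es tro trs md hcond,
      pvSort2_eq_self _ hpw]
  · push_neg at hcond
    exact pvMain_case sio sis es tro trs md (by omega) hcond.2

theorem generate_states_closed_loop_system_changed :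
    Claim_changed_generate_states_closed_loop_system := by
  unfold Claim_changed_generate_states_closed_loop_system
  decide

theorem generate_states_closed_loop_system_tight :
    Claim_exact_generate_states_closed_loop_system := by
  intro sio sis es tro trs md _hdom hD
  obtain ⟨hcond, hnP⟩ := hD
  rw [pvA_drain_eq sio sis es tro trs md hcond, pvB_drain_eq sio sis es tro trs md hcond]
  intro heq
  apply hnP
  refine (pvSeeds_pairwise_iff sio sis).1 ?_
  rw [heq]
  exact pvSort2_pairwise_of_nodup _ (pvSeeds_nodup sio sis)
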